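-- pv_equiv track=rewrite | github.com/ordi-fight/review-of-the-first-semester | array/prefixsum/OSHINOKODA/OSHINOKODA_5.py | bright
-- ===== SOURCE A (Python) =====
-- def bright(N_matrix:list,N:int) -> int :              #fill in the valuable we need
--
--     row = [0]*N
--     col = [0]*N
--     right = [0]*(2*N)
--     left = [0]*(2*N)
--
--     for i in range(N):                                # n*2 times and sum doesn't time one time
--         for j in range(N):
--             a = N_matrix[i][j]                        # define a and assign value:N_matrix[i][j] to a
--             row[i] += a                               #infromations with the same i save in the same box in the 1 dimension array to take in the form of summation
--             col[j]  += a                              #infromations with the same j save in the same box in the 1 dimension array to take in the form of summation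
--             left[i-j+N-1] += a                        #infromations with the same i-j+N-1 save in the same box in the 1 dimension array to take in the form of summation
--             right[i+j] += a                           #infromations with the same i+j save in the same box in the 1 dimension array to take in the form of summation
--
--     return row,col,right,left                         # def difinately need a return if you want to use the value
-- ===== SOURCE B (Python) =====
-- def bright(N_matrix: list, N: int) -> int:
--     # Four independent passes instead of one fused double loop:
--     # rows, columns, and each diagonal are summed along their own axis.
--     row = [sum(N_matrix[i][j] for j in range(N)) for i in range(N)]
--     col = [sum(N_matrix[i][j] for i in range(N)) for j in range(N)]
--     right = [sum(N_matrix[i][k - i] for i in range(N) if 0 <= k - i < N)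
--              for k in range(2 * N)]
--     left = [sum(N_matrix[i][i + N - 1 - k] for i in range(N) if 0 <= i + N - 1 - k < N)
--             for k in range(2 * N)]
--     return row, col, right, left
-- ===== Notes on version B (the rewrite author's own statement) =====
-- stated objective: alternative
-- what changed: A fills four accumulator arrays in one fused double loop with in-place index arithmetic; B computes the same four lists by four independent passes - row sums, column sums, and each diagonal direction summed along its own diagonal index.
import Mathlib
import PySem

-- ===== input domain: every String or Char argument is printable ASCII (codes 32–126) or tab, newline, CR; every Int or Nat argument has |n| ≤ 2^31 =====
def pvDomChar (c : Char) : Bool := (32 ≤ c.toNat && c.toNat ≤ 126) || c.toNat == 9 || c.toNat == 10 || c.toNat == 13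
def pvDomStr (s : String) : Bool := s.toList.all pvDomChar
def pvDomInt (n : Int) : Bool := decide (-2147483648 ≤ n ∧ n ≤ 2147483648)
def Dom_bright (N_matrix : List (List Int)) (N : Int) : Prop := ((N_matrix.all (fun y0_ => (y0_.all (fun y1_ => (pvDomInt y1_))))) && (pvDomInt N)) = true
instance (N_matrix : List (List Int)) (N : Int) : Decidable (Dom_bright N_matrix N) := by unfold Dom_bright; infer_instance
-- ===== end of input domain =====

-- B replaces A's single fused double loop over four accumulator arrays by four independent
-- passes (rows, columns, and each diagonal direction summed along its own axis); objective: alternative decomposition.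

-- ===== PORT A =====
-- 'xs[k] += a' of A (the index is non-negative and in range whenever A's loop executes it)
def pvUpd (xs : List Int) (i a : Int) : List Int :=
  PySem.List.pySetD xs i (PySem.List.pyGetD xs i 0 + a)

def bright (N_matrix : List (List Int)) (N : Int) : List Int × List Int × List Int × List Int :=
  -- row = [0]*N; col = [0]*N; right = [0]*(2*N); left = [0]*(2*N)
  let init : List Int × List Int × List Int × List Int :=
    (List.replicate N.toNat 0, List.replicate N.toNat 0,
     List.replicate (2 * N).toNat 0, List.replicate (2 * N).toNat 0)
  (PySem.List.pyRange 0 N 1).foldl (fun st i =>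
    (PySem.List.pyRange 0 N 1).foldl (fun st j =>
      let a := PySem.List.pyGetD (PySem.List.pyGetD N_matrix i []) j 0
      (pvUpd st.1 i a, pvUpd st.2.1 j a,
       pvUpd st.2.2.1 (i + j) a, pvUpd st.2.2.2 (i - j + N - 1) a)) st) init

-- ===== PORT B =====
def bright_alt (N_matrix : List (List Int)) (N : Int) : List Int × List Int × List Int × List Int :=
  let get := fun (i j : Int) => PySem.List.pyGetD (PySem.List.pyGetD N_matrix i []) j 0
  let rng := PySem.List.pyRange 0 N 1
  let rng2 := PySem.List.pyRange 0 (2 * N) 1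
  let row := rng.map (fun i => (rng.map (fun j => get i j)).sum)
  let col := rng.map (fun j => (rng.map (fun i => get i j)).sum)
  let right := rng2.map (fun k =>
    ((rng.filter (fun i => decide (0 ≤ k - i) && decide (k - i < N))).map (fun i => get i (k - i))).sum)
  let left := rng2.map (fun k =>
    ((rng.filter (fun i => decide (0 ≤ i + N - 1 - k) && decide (i + N - 1 - k < N))).map (fun i => get i (i + N - 1 - k))).sum)
  (row, col, right, left)

-- ===== PRECONDITION & SPEC =====
-- Exactly the inputs on which the Python A returns (no IndexError): every i < N indexes a row
-- of the matrix and each of those rows has at least N entries (for N ≤ 0 the loops never run).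
def Pre_bright (N_matrix : List (List Int)) (N : Int) : Prop :=
  N ≤ (N_matrix.length : Int) ∧ ∀ r ∈ N_matrix.take N.toNat, N ≤ (r.length : Int)
instance (N_matrix : List (List Int)) (N : Int) : Decidable (Pre_bright N_matrix N) := by
  unfold Pre_bright; infer_instance
def pvWitness_bright : List (List Int) × Int := ([[1, 2], [3, 4]], 2)

def Spec_bright (N_matrix : List (List Int)) (N : Int) (out : List Int × List Int × List Int × List Int) : Prop := out = bright_alt N_matrix N
instance (N_matrix : List (List Int)) (N : Int) (out : List Int × List Int × List Int × List Int) : Decidable (Spec_bright N_matrix N out) := by unfold Spec_bright; infer_instance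

-- ===== CLAIM (what is proved, stated in full; the proofs are below) =====
def Claim_equal_bright : Prop := ∀ (N_matrix : List (List Int)) (N : Int), Dom_bright N_matrix N → Pre_bright N_matrix N → Spec_bright N_matrix N (bright N_matrix N)

-- ===== LEMMAS AND PROOFS =====

theorem pv_getD_pvUpd (xs : List Int) (i a : Int) (m : Nat)
    (h0 : 0 ≤ i) (h1 : i < (xs.length : Int)) :
    (pvUpd xs i a).getD m 0 = xs.getD m 0 + (if i = (m : Int) then a else 0) := by
  have hlt : i.toNat < xs.length := by omega
  rw [pvUpd, PySem.List.pySetD_of_nonneg (h := h0),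
    PySem.List.pyGetD_eq_getElem (h0 := h0) (h1 := h1)]
  by_cases hm : i.toNat = m
  · rw [if_pos (by omega)]
    subst hm
    simp [List.getD_eq_getElem?_getD, List.getElem?_set, hlt]
  · rw [if_neg (by omega), add_zero]
    simp [List.getD_eq_getElem?_getD, List.getElem?_set, hm]

theorem pv_length_foldl_upd {α : Type} (L : List α) (f v : α → Int) (xs : List Int) :
    (L.foldl (fun c p => pvUpd c (f p) (v p)) xs).length = xs.length := by
  induction L generalizing xs with
  | nil => rfl
  | cons p t ih => rw [List.foldl_cons, ih]; simp [pvUpd, PySem.List.length_pySetD]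

-- the m-th cell of A's update fold: the initial cell plus the sum of the deposits aimed at m
theorem pv_getD_foldl_upd {α : Type} (L : List α) (f v : α → Int) (xs : List Int) (m : Nat)
    (hf : ∀ p ∈ L, 0 ≤ f p ∧ f p < (xs.length : Int)) :
    (L.foldl (fun c p => pvUpd c (f p) (v p)) xs).getD m 0
      = xs.getD m 0 + (L.map (fun p => if f p = (m : Int) then v p else 0)).sum := by
  induction L generalizing xs with
  | nil => simp
  | cons p t ih =>
    have hp := hf p (List.mem_cons_self)
    have hlen : (pvUpd xs (f p) (v p)).length = xs.length := by
      simp [pvUpd, PySem.List.length_pySetD]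
    rw [List.foldl_cons, ih _ (by intro q hq; rw [hlen]; exact hf q (List.mem_cons_of_mem _ hq)),
      pv_getD_pvUpd _ _ _ _ hp.1 hp.2]
    simp [add_assoc]

theorem pv_sum_map_ite_eq (l : List Int) (c : Int) (h : Int → Int) (hn : l.Nodup) :
    (l.map (fun j => if j = c then h j else 0)).sum = if c ∈ l then h c else 0 := by
  induction l with
  | nil => simp
  | cons x t ih =>
    rw [List.map_cons, List.sum_cons, ih hn.of_cons]
    by_cases hx : x = c
    · subst hx
      have : x ∉ t := (List.nodup_cons.mp hn).1
      simp [this]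
    · simp [hx, List.mem_cons, Ne.symm hx]

theorem pv_sum_map_filter {α : Type} (l : List α) (q : α → Bool) (g : α → Int) :
    ((l.filter q).map g).sum = (l.map (fun x => if q x then g x else 0)).sum := by
  induction l with
  | nil => rfl
  | cons x t ih =>
    by_cases hx : q x <;> simp [List.filter_cons, hx, ih]

theorem pv_sum_flatMap {α : Type} (l : List α) (g : α → List Int) :
    (l.flatMap g).sum = (l.map (fun i => (g i).sum)).sum := by
  induction l <;> simp [*]

theorem pv_sum_ite_out (l : List Int) (c : Prop) [Decidable c] (h : Int → Int) :
    (l.map (fun j => if c then h j else 0)).sum = if c then (l.map h).sum else 0 := by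
  split_ifs <;> simp

-- a fold over a 4-tuple whose components are updated independently splits into four folds
theorem pv_foldl_prod4 {α : Type} (l : List α)
    (f1 f2 f3 f4 : List Int → α → List Int) (s : List Int × List Int × List Int × List Int) :
    l.foldl (fun st x => (f1 st.1 x, f2 st.2.1 x, f3 st.2.2.1 x, f4 st.2.2.2 x)) s
      = (l.foldl f1 s.1, l.foldl f2 s.2.1, l.foldl f3 s.2.2.1, l.foldl f4 s.2.2.2) := by
  induction l generalizing s with
  | nil => rfl
  | cons x t ih => simp [List.foldl_cons, ih]

theorem pv_foldl2_prod4 {α : Type} (l l' : List α)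
    (g1 g2 g3 g4 : List Int → α → α → List Int) (s : List Int × List Int × List Int × List Int) :
    l.foldl (fun st i => l'.foldl (fun st j => (g1 st.1 i j, g2 st.2.1 i j, g3 st.2.2.1 i j, g4 st.2.2.2 i j)) st) s
      = (l.foldl (fun c i => l'.foldl (fun c j => g1 c i j) c) s.1,
         l.foldl (fun c i => l'.foldl (fun c j => g2 c i j) c) s.2.1,
         l.foldl (fun c i => l'.foldl (fun c j => g3 c i j) c) s.2.2.1,
         l.foldl (fun c i => l'.foldl (fun c j => g4 c i j) c) s.2.2.2) := by
  induction l generalizing s with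
  | nil => rfl
  | cons x t ih =>
    rw [List.foldl_cons, ih,
      pv_foldl_prod4 l' (fun c j => g1 c x j) (fun c j => g2 c x j) (fun c j => g3 c x j) (fun c j => g4 c x j) s]
    rfl

-- a nested fold is a fold over the list of index pairs
theorem pv_foldl2_pairs {α : Type} (l l' : List α) (u : List Int → α → α → List Int) (s : List Int) :
    l.foldl (fun c i => l'.foldl (fun c j => u c i j) c) s
      = (l.flatMap (fun i => l'.map (fun j => (i, j)))).foldl (fun c p => u c p.1 p.2) s := by
  induction l generalizing s with
  | nil => rfl
  | cons x t ih => simp [List.foldl_cons, List.foldl_append, List.foldl_map, ih]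

-- A's update fold over all (i, j) pairs, as a list of per-cell double sums
theorem pv_fold_eq_map (N B2 : Int) (idx val : Int → Int → Int) (ent : Int → Int)
    (hidx : ∀ i j, 0 ≤ i → i < N → 0 ≤ j → j < N → 0 ≤ idx i j ∧ idx i j < B2)
    (hent : ∀ m : Nat, m < B2.toNat →
      ((PySem.List.pyRange 0 N 1).map (fun i =>
        ((PySem.List.pyRange 0 N 1).map (fun j => if idx i j = (m : Int) then val i j else 0)).sum)).sum
        = ent (m : Int)) :
    ((PySem.List.pyRange 0 N 1).flatMap (fun i => (PySem.List.pyRange 0 N 1).map (fun j => (i, j)))).foldl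
        (fun c p => pvUpd c (idx p.1 p.2) (val p.1 p.2)) (List.replicate B2.toNat 0)
      = (PySem.List.pyRange 0 B2 1).map ent := by
  apply List.ext_getElem
  · rw [pv_length_foldl_upd]
    simp [PySem.List.length_pyRange_one]
  · intro m h1 h2
    rw [pv_length_foldl_upd] at h1
    simp only [List.length_replicate] at h1
    have hm : m < B2.toNat := h1
    rw [← List.getD_eq_getElem _ 0, pv_getD_foldl_upd]
    · rw [List.getD_replicate]
      · rw [List.map_flatMap, pv_sum_flatMap]
        simp only [List.map_map, Function.comp]
        rw [zero_add]
        rw [List.getElem_map, PySem.List.getElem_pyRange_one, zero_add]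
        exact hent m hm
      · exact hm
    · intro p hp
      simp only [List.mem_flatMap, List.mem_map] at hp
      obtain ⟨i, hi, j, hj, rfl⟩ := hp
      rw [PySem.List.mem_pyRange_one] at hi hj
      have := hidx i j hi.1 hi.2 hj.1 hj.2
      simp only [List.length_replicate]
      omega

theorem bright_eq (M : List (List Int)) (N : Int) : bright M N = bright_alt M N := by
  have hnd : (PySem.List.pyRange 0 N 1).Nodup := PySem.List.nodup_pyRange_one 0 N
  set a : Int → Int → Int := fun i j => PySem.List.pyGetD (PySem.List.pyGetD M i []) j 0 with ha
  unfold bright bright_alt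
  dsimp only
  rw [pv_foldl2_prod4 (PySem.List.pyRange 0 N 1) (PySem.List.pyRange 0 N 1)
    (fun c i j => pvUpd c i (a i j)) (fun c i j => pvUpd c j (a i j))
    (fun c i j => pvUpd c (i + j) (a i j)) (fun c i j => pvUpd c (i - j + N - 1) (a i j))]
  simp only [Prod.mk.injEq]
  refine ⟨?_, ?_, ?_, ?_⟩
  · -- row
    rw [pv_foldl2_pairs _ _ (fun c i j => pvUpd c i (a i j))]
    apply pv_fold_eq_map N N (fun i _ => i) a
    · intro i j h0 h1 h2 h3; exact ⟨h0, h1⟩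
    · intro m hm
      simp only [pv_sum_ite_out]
      rw [pv_sum_map_ite_eq _ _ _ hnd, if_pos]
      rw [PySem.List.mem_pyRange_one]; omega
  · -- col
    rw [pv_foldl2_pairs _ _ (fun c i j => pvUpd c j (a i j))]
    apply pv_fold_eq_map N N (fun _ j => j) a
    · intro i j h0 h1 h2 h3; exact ⟨h2, h3⟩
    · intro m hm
      have hmem : (m : Int) ∈ PySem.List.pyRange 0 N 1 := by
        rw [PySem.List.mem_pyRange_one]; omega
      simp only [pv_sum_map_ite_eq _ _ _ hnd, if_pos hmem]
      rfl
  · -- right diagonal: i + j = k  ⇔  j = k - i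
    rw [pv_foldl2_pairs _ _ (fun c i j => pvUpd c (i + j) (a i j))]
    apply pv_fold_eq_map N (2 * N) (fun i j => i + j) a
    · intro i j h0 h1 h2 h3; omega
    · intro m hm
      rw [pv_sum_map_filter]
      have hc : ∀ i : Int, (fun j => if i + j = (m : Int) then a i j else 0)
          = (fun j => if j = (m : Int) - i then a i j else 0) := by
        intro i; funext j
        by_cases h : i + j = (m : Int)
        · rw [if_pos h, if_pos (by omega)]
        · rw [if_neg h, if_neg (by omega)]
      simp only [hc, pv_sum_map_ite_eq _ _ _ hnd, PySem.List.mem_pyRange_one,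
        Bool.and_eq_true, decide_eq_true_eq]
      rfl
  · -- left diagonal: i - j + N - 1 = k  ⇔  j = i + N - 1 - k
    rw [pv_foldl2_pairs _ _ (fun c i j => pvUpd c (i - j + N - 1) (a i j))]
    apply pv_fold_eq_map N (2 * N) (fun i j => i - j + N - 1) a
    · intro i j h0 h1 h2 h3; omega
    · intro m hm
      rw [pv_sum_map_filter]
      have hc : ∀ i : Int, (fun j => if i - j + N - 1 = (m : Int) then a i j else 0)
          = (fun j => if j = i + N - 1 - (m : Int) then a i j else 0) := by
        intro i; funext j
        by_cases h : i - j + N - 1 = (m : Int)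
        · rw [if_pos h, if_pos (by omega)]
        · rw [if_neg h, if_neg (by omega)]
      simp only [hc, pv_sum_map_ite_eq _ _ _ hnd, PySem.List.mem_pyRange_one,
        Bool.and_eq_true, decide_eq_true_eq]
      rfl

-- ===== VERDICT (by name: the statement is the Claim_ definition above) =====
theorem bright_spec : Claim_equal_bright := by
  intro M N _ _
  show bright M N = bright_alt M N
  exact bright_eq M N
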